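-- pv_equiv track=rewrite | github.com/Paritosh125/GenResume-AI | backend/server.py | _has_excessive_consonants
-- ===== SOURCE A (Python) =====
-- def _has_excessive_consonants(token):
--     vowels = set("aeiou")
--     run = 0
--     for ch in token.lower():
--         if ch.isalpha():
--             if ch in vowels:
--                 run = 0
--             else:
--                 run += 1
--                 if run >= 4:
--                     return True
--     return False
-- ===== SOURCE B (Python) =====
-- def _has_excessive_consonants(token):
--     # filter-then-group: keep only letters (lowercased), split into maximal
--     # runs of equal vowel-ness, succeed iff some consonant run has length >= 4
--     letters = [c for c in token.lower() if c.isalpha()]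
--     total = len(letters)
--     groups = []
--     i = 0
--     while i < total:
--         key = letters[i] in "aeiou"
--         j = i + 1
--         while j < total and (letters[j] in "aeiou") == key:
--             j += 1
--         groups.append((key, j - i))
--         i = j
--     return any(not v and n >= 4 for v, n in groups)
-- ===== Notes on version B (the rewrite author's own statement) =====
-- stated objective: alternative
-- what changed: Replaces A's stateful single-pass counter with early return by a filter-then-group decomposition: keep only lowercased letters, split them into maximal runs of equal vowel-ness, and test whether any consonant run has length >= 4.
import Mathlib
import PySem

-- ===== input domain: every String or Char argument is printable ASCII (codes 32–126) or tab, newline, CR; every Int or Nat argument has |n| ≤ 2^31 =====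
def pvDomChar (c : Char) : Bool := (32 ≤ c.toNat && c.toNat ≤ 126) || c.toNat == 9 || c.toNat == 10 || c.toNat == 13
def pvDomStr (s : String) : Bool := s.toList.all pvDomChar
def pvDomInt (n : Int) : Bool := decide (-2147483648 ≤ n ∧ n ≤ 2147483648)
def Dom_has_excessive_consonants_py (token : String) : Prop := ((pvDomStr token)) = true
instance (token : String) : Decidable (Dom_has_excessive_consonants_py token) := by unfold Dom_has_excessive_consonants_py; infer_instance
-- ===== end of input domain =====

-- B replaces A's stateful consonant-run counter by a filter-then-group decomposition (same return value, same cost).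


-- vowels = set("aeiou"); 'ch in vowels' (used by both sources)
def isVow (c : Char) : Bool := c ∈ (['a', 'e', 'i', 'o', 'u'] : List Char)

-- ===== PORT A =====
-- the for-loop with its `run` counter and early `return True`
def aLoop : List Char → Nat → Bool
  | [], _ => false
  | ch :: rest, run =>
    if PySem.Chars.isalpha ch then
      if isVow ch then aLoop rest 0
      else if run + 1 ≥ 4 then true else aLoop rest (run + 1)
    else aLoop rest run

def has_excessive_consonants_py (token : String) : Bool :=
  aLoop (PySem.Chars.lower token.toList) 0

-- ===== PORT B =====
-- groups(seq): leading maximal run of equal vowel-ness (the while loop = takeWhile), then recurse on the rest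
def grpRuns : List Char → List (Bool × Nat)
  | [] => []
  | c :: cs =>
    let k := isVow c
    (k, 1 + (cs.takeWhile (fun x => isVow x == k)).length)
      :: grpRuns (cs.dropWhile (fun x => isVow x == k))
termination_by l => l.length
decreasing_by
  simp only [List.length_cons]
  exact Nat.lt_succ_of_le (List.length_dropWhile_le _ _)

def has_excessive_consonants_py_alt (token : String) : Bool :=
  ((grpRuns ((PySem.Chars.lower token.toList).filter PySem.Chars.isalpha)).any
    (fun p => !p.1 && decide (p.2 ≥ 4)))

-- ===== PRECONDITION & SPEC =====
def Spec_has_excessive_consonants_py (token : String) (out : Bool) : Prop := out = has_excessive_consonants_py_alt token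
instance (token : String) (out : Bool) : Decidable (Spec_has_excessive_consonants_py token out) := by unfold Spec_has_excessive_consonants_py; infer_instance

-- ===== CLAIM (what is proved, stated in full; the proofs are below) =====
def Claim_equal_has_excessive_consonants_py : Prop := ∀ (token : String), Dom_has_excessive_consonants_py token → Spec_has_excessive_consonants_py token (has_excessive_consonants_py token)

-- ===== LEMMAS AND PROOFS =====

-- A's loop over only the alphabetic characters (non-letters change nothing)
def aLoopF : List Char → Nat → Bool
  | [], _ => false
  | ch :: rest, run =>
    if isVow ch then aLoopF rest 0
    else if run + 1 ≥ 4 then true else aLoopF rest (run + 1)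

theorem aLoop_eq_filter (l : List Char) (run : Nat) :
    aLoop l run = aLoopF (l.filter PySem.Chars.isalpha) run := by
  induction l generalizing run with
  | nil => rfl
  | cons c cs ih =>
    by_cases h : PySem.Chars.isalpha c = true
    · simp only [aLoop, List.filter_cons, h, if_pos, aLoopF]
      by_cases hv : isVow c = true
      · simp [hv, ih]
      · simp only [Bool.not_eq_true] at hv
        simp only [hv, if_false, Bool.false_eq_true]
        split <;> simp [ih]
    · simp only [Bool.not_eq_true] at h
      simp [aLoop, h, ih]

def pvAny (g : List (Bool × Nat)) : Bool := g.any (fun p => !p.1 && decide (p.2 ≥ 4))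

-- length of the leading consonant run
def leadC (l : List Char) : Nat := (l.takeWhile (fun x => isVow x == false)).length

theorem pvAny_dropCons (l : List Char) :
    pvAny (grpRuns l) = (decide (leadC l ≥ 4) || pvAny (grpRuns (l.dropWhile (fun x => isVow x == false)))) := by
  cases l with
  | nil => simp [grpRuns, pvAny, leadC]
  | cons d ds =>
    by_cases hd : isVow d = true
    · simp [grpRuns, pvAny, leadC, hd]
    · simp only [Bool.not_eq_true] at hd
      simp only [grpRuns, hd, pvAny, List.any_cons, leadC, List.takeWhile_cons,
        List.dropWhile_cons, beq_self_eq_true, if_pos, Bool.not_false, Bool.true_and]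
      simp [Nat.add_comm]

theorem aLoopF_eq_grp (l : List Char) (run : Nat) (hrun : run ≤ 3) :
    aLoopF l run = (pvAny (grpRuns l) || decide (run + leadC l ≥ 4)) := by
  induction l generalizing run with
  | nil =>
    simp [aLoopF, grpRuns, pvAny, leadC]
    omega
  | cons c cs ih =>
    by_cases hv : isVow c = true
    · -- vowel: counter resets; c joins (or starts) a vowel group which never matches
      have h0 : leadC (c :: cs) = 0 := by simp [leadC, hv]
      have hrhs : (decide (run + 0 ≥ 4)) = false := by simp; omega
      simp only [aLoopF, hv, if_pos, h0, hrhs, Bool.or_false]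
      rw [ih 0 (by omega)]
      have hgrp : pvAny (grpRuns (c :: cs)) = pvAny (grpRuns (cs.dropWhile (fun x => isVow x == true))) := by
        simp [grpRuns, pvAny, hv]
      rw [hgrp]
      cases cs with
      | nil => simp [grpRuns, pvAny, leadC]
      | cons d ds =>
        by_cases hd : isVow d = true
        · have hlz : decide (0 + leadC (d :: ds) ≥ 4) = false := by
            simp [leadC, hd]
          rw [hlz, Bool.or_false]
          simp [grpRuns, pvAny, hd]
        · simp only [Bool.not_eq_true] at hd
          have h1 : (d :: ds).dropWhile (fun x => isVow x == true) = d :: ds := by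
            simp [hd]
          rw [h1, pvAny_dropCons (d :: ds)]
          have h2 : decide (0 + leadC (d :: ds) ≥ 4) = decide (leadC (d :: ds) ≥ 4) := by simp
          rw [h2]
          cases decide (leadC (d :: ds) ≥ 4) <;>
            cases pvAny (grpRuns ((d :: ds).dropWhile (fun x => isVow x == false))) <;> simp
    · simp only [Bool.not_eq_true] at hv
      have hlead : leadC (c :: cs) = 1 + leadC cs := by
        simp [leadC, hv, Nat.add_comm]
      by_cases h4 : run + 1 ≥ 4
      · have hl : aLoopF (c :: cs) run = true := by
          simp [aLoopF, hv, h4]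
        rw [hl, hlead]
        have : (decide (run + (1 + leadC cs) ≥ 4)) = true := by simp; omega
        rw [this, Bool.or_true]
      · have hl : aLoopF (c :: cs) run = aLoopF cs (run + 1) := by
          simp [aLoopF, hv, h4]
        rw [hl, ih (run + 1) (by omega), hlead]
        have hgrp : pvAny (grpRuns (c :: cs)) =
            (decide (1 + leadC cs ≥ 4) || pvAny (grpRuns (cs.dropWhile (fun x => isVow x == false)))) := by
          simp only [grpRuns, hv, pvAny, List.any_cons, Bool.not_false, Bool.true_and, leadC,
            ge_iff_le]
          try simp [Nat.add_comm]
        rw [hgrp, pvAny_dropCons cs]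
        generalize pvAny (grpRuns (cs.dropWhile (fun x => isVow x == false))) = p
        cases p with
        | false =>
          simp only [Bool.or_false]
          rw [← Bool.decide_or, ← Bool.decide_or, decide_eq_decide]
          omega
        | true => simp

-- ===== VERDICT (by name: the statement is the Claim_ definition above) =====
theorem has_excessive_consonants_py_spec : Claim_equal_has_excessive_consonants_py := by
  intro token _
  unfold Spec_has_excessive_consonants_py has_excessive_consonants_py has_excessive_consonants_py_alt
  rw [aLoop_eq_filter]
  show aLoopF _ 0 = pvAny (grpRuns ((PySem.Chars.lower token.toList).filter PySem.Chars.isalpha))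
  rw [aLoopF_eq_grp _ 0 (by omega)]
  rcases Nat.lt_or_ge (leadC ((PySem.Chars.lower token.toList).filter PySem.Chars.isalpha)) 4 with h | h
  · have : decide (0 + leadC ((PySem.Chars.lower token.toList).filter PySem.Chars.isalpha) ≥ 4) = false := by
      simp; omega
    rw [this, Bool.or_false]
  · have h1 : pvAny (grpRuns ((PySem.Chars.lower token.toList).filter PySem.Chars.isalpha)) = true := by
      rw [pvAny_dropCons]
      simp [h]
    simp [h1]
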